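-- pv_equiv track=rewrite | github.com/CharlesFee/CS115-Code | life_starter/life.py | innerCells
-- ===== SOURCE A (Python) =====
-- def createOneRow(width):
--     """Returns one row of zeros of width "width"...
--        You should use this in your
--        createBoard(width, height) function."""
--     row = []
--     for col in range(width):
--         row += [0]
--     return row
--
-- def createBoard(width, height):
--     "creates a new board with the given dimensions"
--
--     A = []
--
--     for row in range(height):
--         A+=[createOneRow(width)]
--
--     return A
--
-- def innerCells(width,height):
--     "creates a border of zeroes and makes the inside 1s"
--     A= createBoard(width,height)
--     for row in range(height):
--         if row!= 0 and row != height-1: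
--             for col in range(width):
--                 if col !=0 and col != width-1:
--                     A[row][col]=1
--                 else:
--                     A[row][col]=0
--     return A
-- ===== SOURCE B (Python) =====
-- def innerCells(width, height):
--     "creates a border of zeroes and makes the inside 1s"
--     A = [[1] * width for _ in range(height)]
--     for r in range(height):
--         if r == 0 or r == height - 1:
--             A[r] = [0] * width
--         elif width > 0:
--             A[r][0] = 0
--             A[r][width - 1] = 0
--     return A
-- ===== Notes on version B (the rewrite author's own statement) =====
-- stated objective: alternative
-- what changed: B starts from an all-ones board and zeroes only the frame (first/last row wholesale, two end cells of each middle row), instead of A's zero board with a per-cell interior double loop.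
import Mathlib
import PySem

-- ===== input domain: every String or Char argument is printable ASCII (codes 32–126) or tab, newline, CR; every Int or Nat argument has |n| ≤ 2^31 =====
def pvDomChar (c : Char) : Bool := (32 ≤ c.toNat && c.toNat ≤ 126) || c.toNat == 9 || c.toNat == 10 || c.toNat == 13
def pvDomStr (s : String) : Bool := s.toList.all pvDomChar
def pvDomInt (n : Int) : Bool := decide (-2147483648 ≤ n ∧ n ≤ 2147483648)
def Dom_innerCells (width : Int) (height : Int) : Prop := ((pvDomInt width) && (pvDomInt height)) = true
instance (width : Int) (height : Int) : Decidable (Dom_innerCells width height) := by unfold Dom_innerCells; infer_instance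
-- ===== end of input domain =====

-- B builds an all-ones board and zeroes only the frame (first/last row wholesale, the two
-- end cells of each middle row) instead of A's zero board with a per-cell interior double
-- loop; same asymptotic cost, different decomposition (objective: alternative).

-- ===== PORT A =====
def createOneRow (width : Int) : List Int :=
  (PySem.List.pyRange 0 width 1).foldl (fun row _col => row ++ [(0 : Int)]) []

def createBoard (width : Int) (height : Int) : List (List Int) :=
  (PySem.List.pyRange 0 height 1).foldl (fun A _row => A ++ [createOneRow width]) []

def innerCells (width : Int) (height : Int) : List (List Int) :=
  (PySem.List.pyRange 0 height 1).foldl (fun A row =>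
    if row ≠ 0 ∧ row ≠ height - 1 then
      (PySem.List.pyRange 0 width 1).foldl (fun A col =>
        if col ≠ 0 ∧ col ≠ width - 1 then
          PySem.List.pySetD A row (PySem.List.pySetD (PySem.List.pyGetD A row []) col 1)
        else
          PySem.List.pySetD A row (PySem.List.pySetD (PySem.List.pyGetD A row []) col 0)) A
    else A) (createBoard width height)

-- ===== PORT B =====
def innerCells_alt (width : Int) (height : Int) : List (List Int) :=
  let A0 := (PySem.List.pyRange 0 height 1).map (fun _ => List.replicate width.toNat (1 : Int))
  (PySem.List.pyRange 0 height 1).foldl (fun A r =>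
    if r = 0 ∨ r = height - 1 then
      PySem.List.pySetD A r (List.replicate width.toNat (0 : Int))
    else if 0 < width then
      let A1 := PySem.List.pySetD A r (PySem.List.pySetD (PySem.List.pyGetD A r []) 0 0)
      PySem.List.pySetD A1 r (PySem.List.pySetD (PySem.List.pyGetD A1 r []) (width - 1) 0)
    else A) A0

-- ===== PRECONDITION & SPEC =====
def Spec_innerCells (width : Int) (height : Int) (out : List (List Int)) : Prop := out = innerCells_alt width height
instance (width : Int) (height : Int) (out : List (List Int)) : Decidable (Spec_innerCells width height out) := by unfold Spec_innerCells; infer_instance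

-- ===== CLAIM (what is proved, stated in full; the proofs are below) =====
def Claim_equal_innerCells : Prop := ∀ (width : Int) (height : Int), Dom_innerCells width height → Spec_innerCells width height (innerCells width height)

-- ===== LEMMAS AND PROOFS =====

theorem pvGetMid {α : Type} (pre post : List α) (x d : α) :
    PySem.List.pyGetD (pre ++ x :: post) (pre.length : Int) d = x := by
  simp [PySem.List.pyGetD_natCast, List.getD_eq_getElem?_getD]

theorem pvSetMid {α : Type} (pre post : List α) (x y : α) :
    PySem.List.pySetD (pre ++ x :: post) (pre.length : Int) y = pre ++ y :: post := by
  simp [PySem.List.pySetD_natCast]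

/-- A fold over `range(len(pre), len(pre)+len(post))` whose step rewrites the indexed row
    in place replaces each row of `post` by `F index row`. -/
theorem pvSetAll {α : Type} (step : List α → Int → List α) (F : Int → α → α)
    (hstep : ∀ (pre post : List α) (x : α),
      step (pre ++ x :: post) (pre.length : Int) = pre ++ F (pre.length : Int) x :: post) :
    ∀ (post pre : List α),
      (PySem.List.pyRange (pre.length : Int) ((pre.length : Int) + post.length) 1).foldl step (pre ++ post)
        = pre ++ (PySem.List.enumerate post (pre.length : Int)).map (fun p => F p.1 p.2) := by
  intro post
  induction post with
  | nil =>
      intro pre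
      simp [PySem.List.pyRange_one_eq_nil (le_refl ((pre.length : Int))), PySem.List.enumerate_nil]
  | cons x post ih =>
      intro pre
      have h1 : (pre.length : Int) < (pre.length : Int) + ((x :: post).length : Int) := by
        simp only [List.length_cons]; push_cast; omega
      rw [PySem.List.pyRange_one_cons h1]
      simp only [List.foldl_cons, hstep, PySem.List.enumerate_cons, List.map_cons]
      have h2 := ih (pre ++ [F (pre.length : Int) x])
      simp only [List.length_append, List.length_cons, List.length_nil,
        List.append_assoc, List.singleton_append] at h2 ⊢
      push_cast at h2 ⊢
      have hb : (pre.length : Int) + ((post.length : Int) + 1) = ((pre.length : Int) + 1) + (post.length : Int) := by ring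
      rw [hb]
      exact h2

theorem pvEnumRepl {α : Type} (x : α) :
    ∀ (n : Nat) (s : Int), PySem.List.enumerate (List.replicate n x) s
      = (PySem.List.pyRange s (s + n) 1).map (fun i => (i, x)) := by
  intro n
  induction n with
  | zero => intro s; simp [PySem.List.enumerate_nil]
  | succ n ih =>
      intro s
      have h1 : s < s + ((n + 1 : Nat) : Int) := by push_cast; omega
      rw [List.replicate_succ, PySem.List.enumerate_cons, PySem.List.pyRange_one_cons h1, List.map_cons, ih (s + 1)]
      have : s + ((n + 1 : Nat) : Int) = (s + 1) + (n : Int) := by push_cast; ring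
      rw [this]

/-- A's inner column loop only ever rewrites row `pre.length`; it acts on that row alone. -/
theorem pvInnerComm (g : Int → Int) :
    ∀ (l : List Int) (pre post : List (List Int)) (x : List Int),
      l.foldl (fun B c => PySem.List.pySetD B (pre.length : Int)
          (PySem.List.pySetD (PySem.List.pyGetD B (pre.length : Int) []) c (g c))) (pre ++ x :: post)
        = pre ++ l.foldl (fun row c => PySem.List.pySetD row c (g c)) x :: post := by
  intro l
  induction l with
  | nil => intro pre post x; simp
  | cons c l ih =>
      intro pre post x
      simp only [List.foldl_cons, pvGetMid, pvSetMid]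
      exact ih pre post _

theorem pvCreateOneRow (w : Int) : createOneRow w = List.replicate w.toNat (0 : Int) := by
  unfold createOneRow
  rw [show (fun (row : List Int) (_col : Int) => row ++ [(0:Int)])
        = fun (acc : List Int) (x : Int) => acc ++ [(fun _ => (0:Int)) x] from rfl,
    PySem.List.foldl_append_singleton_eq_map]
  simp [List.map_const', PySem.List.length_pyRange_one]

theorem pvCreateBoard (w h : Int) :
    createBoard w h = List.replicate h.toNat (List.replicate w.toNat (0 : Int)) := by
  unfold createBoard
  rw [show (fun (A : List (List Int)) (_row : Int) => A ++ [createOneRow w])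
        = fun (acc : List (List Int)) (x : Int) => acc ++ [(fun _ => createOneRow w) x] from rfl,
    PySem.List.foldl_append_singleton_eq_map]
  simp [List.map_const', PySem.List.length_pyRange_one, pvCreateOneRow]

/-- canonical value of a middle row -/
def pvRow (w : Int) : List Int :=
  (PySem.List.pyRange 0 w 1).map (fun c => if c ≠ 0 ∧ c ≠ w - 1 then (1 : Int) else 0)

/-- A's column loop on a full-width row produces the canonical middle row. -/
theorem pvColFold (w : Int) (hw : 0 ≤ w) :
    (PySem.List.pyRange 0 w 1).foldl
        (fun row c => PySem.List.pySetD row c (if c ≠ 0 ∧ c ≠ w - 1 then (1 : Int) else 0))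
        (List.replicate w.toNat (0 : Int)) = pvRow w := by
  have hstep : ∀ (pre post : List Int) (x : Int),
      (fun row c => PySem.List.pySetD row c (if c ≠ 0 ∧ c ≠ w - 1 then (1 : Int) else 0)) (pre ++ x :: post) (pre.length : Int)
        = pre ++ (fun (c : Int) (_x : Int) => if c ≠ 0 ∧ c ≠ w - 1 then (1 : Int) else 0) (pre.length : Int) x :: post := by
    intro pre post x; exact pvSetMid pre post x _
  have h := pvSetAll
      (fun row c => PySem.List.pySetD row c (if c ≠ 0 ∧ c ≠ w - 1 then (1 : Int) else 0))
      (fun (c : Int) (_x : Int) => if c ≠ 0 ∧ c ≠ w - 1 then (1 : Int) else 0)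
      hstep (List.replicate w.toNat (0 : Int)) []
  simp only [List.length_nil, Nat.cast_zero, List.nil_append, List.length_replicate, zero_add] at h
  rw [show ((w.toNat : Int)) = w from Int.toNat_of_nonneg hw] at h
  rw [h, pvEnumRepl, List.map_map]
  simp [pvRow, show max w 0 = w from by omega]

/-- B's two border writes on an all-ones row produce the canonical middle row. -/
theorem pvBRow (w : Int) (hw : 0 < w) :
    PySem.List.pySetD (PySem.List.pySetD (List.replicate w.toNat (1 : Int)) 0 0) (w - 1) 0 = pvRow w := by
  have e0 : PySem.List.pySetD (List.replicate w.toNat (1:Int)) 0 0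
      = (List.replicate w.toNat (1:Int)).set (0:Int).toNat 0 :=
    PySem.List.pySetD_of_nonneg _ 0 (le_refl 0)
  rw [e0]
  have e1 : PySem.List.pySetD ((List.replicate w.toNat (1:Int)).set (0:Int).toNat 0) (w-1) 0
      = ((List.replicate w.toNat (1:Int)).set (0:Int).toNat 0).set (w-1).toNat 0 :=
    PySem.List.pySetD_of_nonneg _ 0 (by omega)
  rw [e1]
  apply List.ext_getElem
  · simp [pvRow, PySem.List.length_pyRange_one]
  · intro i h1 h2
    simp only [List.length_set, List.length_replicate] at h1
    simp only [pvRow, List.getElem_map, PySem.List.getElem_pyRange_one, List.getElem_set,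
      List.getElem_replicate]
    split_ifs <;> omega

theorem pvMain (w h : Int) : innerCells w h = innerCells_alt w h := by
  by_cases hh : 0 ≤ h
  · -- h ≥ 0
    have hhn : ((h.toNat : Int)) = h := Int.toNat_of_nonneg hh
    -- A side
    have hstepA : ∀ (pre post : List (List Int)) (x : List Int),
        (fun A row =>
          if row ≠ 0 ∧ row ≠ h - 1 then
            (PySem.List.pyRange 0 w 1).foldl (fun A col =>
              if col ≠ 0 ∧ col ≠ w - 1 then
                PySem.List.pySetD A row (PySem.List.pySetD (PySem.List.pyGetD A row []) col 1)
              else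
                PySem.List.pySetD A row (PySem.List.pySetD (PySem.List.pyGetD A row []) col 0)) A
          else A) (pre ++ x :: post) (pre.length : Int)
          = pre ++ (fun (r : Int) (x : List Int) =>
              if r ≠ 0 ∧ r ≠ h - 1 then
                (PySem.List.pyRange 0 w 1).foldl
                  (fun row c => PySem.List.pySetD row c (if c ≠ 0 ∧ c ≠ w - 1 then (1:Int) else 0)) x
              else x) (pre.length : Int) x :: post := by
      intro pre post x
      beta_reduce
      by_cases hc : ((pre.length : Int) ≠ 0 ∧ (pre.length : Int) ≠ h - 1)
      · rw [if_pos hc, if_pos hc]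
        have hfun : (fun (A : List (List Int)) (col : Int) =>
            if col ≠ 0 ∧ col ≠ w - 1 then
              PySem.List.pySetD A (pre.length : Int) (PySem.List.pySetD (PySem.List.pyGetD A (pre.length : Int) []) col 1)
            else
              PySem.List.pySetD A (pre.length : Int) (PySem.List.pySetD (PySem.List.pyGetD A (pre.length : Int) []) col 0))
            = fun (A : List (List Int)) (col : Int) =>
              PySem.List.pySetD A (pre.length : Int)
                (PySem.List.pySetD (PySem.List.pyGetD A (pre.length : Int) []) col
                  (if col ≠ 0 ∧ col ≠ w - 1 then (1:Int) else 0)) := by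
          funext A col
          by_cases hcc : (col ≠ 0 ∧ col ≠ w - 1) <;> simp [hcc]
        rw [hfun, pvInnerComm]
      · rw [if_neg hc, if_neg hc]
    have hA := pvSetAll
        (fun A row =>
          if row ≠ 0 ∧ row ≠ h - 1 then
            (PySem.List.pyRange 0 w 1).foldl (fun A col =>
              if col ≠ 0 ∧ col ≠ w - 1 then
                PySem.List.pySetD A row (PySem.List.pySetD (PySem.List.pyGetD A row []) col 1)
              else
                PySem.List.pySetD A row (PySem.List.pySetD (PySem.List.pyGetD A row []) col 0)) A
          else A)
        (fun (r : Int) (x : List Int) =>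
          if r ≠ 0 ∧ r ≠ h - 1 then
            (PySem.List.pyRange 0 w 1).foldl
              (fun row c => PySem.List.pySetD row c (if c ≠ 0 ∧ c ≠ w - 1 then (1:Int) else 0)) x
          else x)
        hstepA (List.replicate h.toNat (List.replicate w.toNat (0 : Int))) []
    simp only [List.length_nil, Nat.cast_zero, List.nil_append, List.length_replicate, zero_add] at hA
    rw [hhn] at hA
    -- B side
    have hstepB : ∀ (pre post : List (List Int)) (x : List Int),
        (fun A r =>
          if r = 0 ∨ r = h - 1 then
            PySem.List.pySetD A r (List.replicate w.toNat (0 : Int))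
          else if 0 < w then
            let A1 := PySem.List.pySetD A r (PySem.List.pySetD (PySem.List.pyGetD A r []) 0 0)
            PySem.List.pySetD A1 r (PySem.List.pySetD (PySem.List.pyGetD A1 r []) (w - 1) 0)
          else A) (pre ++ x :: post) (pre.length : Int)
          = pre ++ (fun (r : Int) (x : List Int) =>
              if r = 0 ∨ r = h - 1 then List.replicate w.toNat (0 : Int)
              else if 0 < w then PySem.List.pySetD (PySem.List.pySetD x 0 0) (w - 1) 0
              else x) (pre.length : Int) x :: post := by
      intro pre post x
      beta_reduce
      by_cases hc : ((pre.length : Int) = 0 ∨ (pre.length : Int) = h - 1)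
      · rw [if_pos hc, if_pos hc]
        exact pvSetMid _ _ _ _
      · by_cases hw : 0 < w
        · rw [if_neg hc, if_neg hc, if_pos hw, if_pos hw]
          simp only [pvGetMid, pvSetMid]
        · rw [if_neg hc, if_neg hc, if_neg hw, if_neg hw]
    have hB := pvSetAll
        (fun A r =>
          if r = 0 ∨ r = h - 1 then
            PySem.List.pySetD A r (List.replicate w.toNat (0 : Int))
          else if 0 < w then
            let A1 := PySem.List.pySetD A r (PySem.List.pySetD (PySem.List.pyGetD A r []) 0 0)
            PySem.List.pySetD A1 r (PySem.List.pySetD (PySem.List.pyGetD A1 r []) (w - 1) 0)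
          else A)
        (fun (r : Int) (x : List Int) =>
          if r = 0 ∨ r = h - 1 then List.replicate w.toNat (0 : Int)
          else if 0 < w then PySem.List.pySetD (PySem.List.pySetD x 0 0) (w - 1) 0
          else x)
        hstepB (List.replicate h.toNat (List.replicate w.toNat (1 : Int))) []
    simp only [List.length_nil, Nat.cast_zero, List.nil_append, List.length_replicate, zero_add] at hB
    rw [hhn] at hB
    -- assemble
    unfold innerCells innerCells_alt
    rw [pvCreateBoard, hA]
    rw [show ((PySem.List.pyRange 0 h 1).map (fun _ => List.replicate w.toNat (1 : Int)))
        = List.replicate h.toNat (List.replicate w.toNat (1 : Int)) by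
      simp [List.map_const', PySem.List.length_pyRange_one]]
    rw [hB, pvEnumRepl, pvEnumRepl, List.map_map, List.map_map]
    simp only [zero_add]
    apply List.map_congr_left
    intro r hr
    rw [PySem.List.mem_pyRange_one] at hr
    by_cases hbord : (r = 0 ∨ r = h - 1)
    · rcases hbord with h0 | h0 <;> subst h0 <;> simp [Function.comp]
    · have hmid : (r ≠ 0 ∧ r ≠ h - 1) := by tauto
      by_cases hw : 0 < w
      · simp only [Function.comp, hmid.1, hmid.2, hw, ne_eq, not_false_eq_true, and_self,
          if_true, or_self, if_false]
        rw [pvColFold w hw.le, pvBRow w hw]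
      · have hw0 : w.toNat = 0 := by omega
        have hrange : PySem.List.pyRange 0 w 1 = [] := PySem.List.pyRange_one_eq_nil (by omega)
        simp [Function.comp, hmid.1, hmid.2, hw, hw0, hrange]
  · -- h < 0 : both boards are empty
    have hrange : PySem.List.pyRange 0 h 1 = [] := PySem.List.pyRange_one_eq_nil (by omega)
    have hb : createBoard w h = [] := by
      unfold createBoard; rw [hrange]; rfl
    unfold innerCells innerCells_alt
    rw [hrange, hb]
    rfl

-- ===== VERDICT (by name: the statement is the Claim_ definition above) =====
theorem innerCells_spec : Claim_equal_innerCells := by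
  intro w h _
  unfold Spec_innerCells
  exact pvMain w h
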